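-- pv_equiv track=rewrite | github.com/iamcoderisk/sendbaba | app/services/reply/reply_intelligence.py | categorize_reply
-- ===== SOURCE A (Python) =====
-- def categorize_reply(text, intent):
--     """Categorize for routing"""
--     # Pricing questions
--     if any(w in text for w in ['price', 'cost', 'pricing', 'how much', '$', 'fee', 'payment']):
--         return 'pricing'
--
--     # Demo/trial requests
--     if any(w in text for w in ['demo', 'trial', 'test', 'try', 'see it', 'show me']):
--         return 'demo_request'
--
--     # Feature questions
--     if any(w in text for w in ['feature', 'can it', 'does it', 'support', 'integrate', 'work with']):
--         return 'features'
--
--     # Technical support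
--     if intent == 'support':
--         return 'support'
--
--     # Opt-out
--     if intent == 'not_interested':
--         return 'opt_out'
--
--     # Meeting request
--     if any(w in text for w in ['call', 'meeting', 'schedule', 'talk', 'discuss', 'speak']):
--         return 'meeting_request'
--
--     return 'general'
-- ===== SOURCE B (Python) =====
-- # Two-stage pass: collect ALL matching categories as a set, then pick the highest-priority one.
-- KEYWORDS = {
--     'pricing': ['price', 'cost', 'pricing', 'how much', '$', 'fee', 'payment'],
--     'demo_request': ['demo', 'trial', 'test', 'try', 'see it', 'show me'],
--     'features': ['feature', 'can it', 'does it', 'support', 'integrate', 'work with'],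
--     'meeting_request': ['call', 'meeting', 'schedule', 'talk', 'discuss', 'speak'],
-- }
-- INTENT_CATEGORY = {'support': 'support', 'not_interested': 'opt_out'}
-- PRIORITY = ['pricing', 'demo_request', 'features', 'support', 'opt_out', 'meeting_request']
--
-- def categorize_reply(text, intent):
--     """Categorize for routing"""
--     matched = {cat for cat, ws in KEYWORDS.items() if any(w in text for w in ws)}
--     if intent in INTENT_CATEGORY:
--         matched.add(INTENT_CATEGORY[intent])
--     return next((cat for cat in PRIORITY if cat in matched), 'general')
-- ===== Notes on version B (the rewrite author's own statement) =====
-- stated objective: alternative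
-- what changed: Instead of a short-circuiting first-match if-chain, B evaluates every rule, collects the full set of matching categories in one pass, and then selects the winner by a separate priority list; this is correct because each rule's condition is independent of the others and the priority list reproduces the chain's order.
import Mathlib
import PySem

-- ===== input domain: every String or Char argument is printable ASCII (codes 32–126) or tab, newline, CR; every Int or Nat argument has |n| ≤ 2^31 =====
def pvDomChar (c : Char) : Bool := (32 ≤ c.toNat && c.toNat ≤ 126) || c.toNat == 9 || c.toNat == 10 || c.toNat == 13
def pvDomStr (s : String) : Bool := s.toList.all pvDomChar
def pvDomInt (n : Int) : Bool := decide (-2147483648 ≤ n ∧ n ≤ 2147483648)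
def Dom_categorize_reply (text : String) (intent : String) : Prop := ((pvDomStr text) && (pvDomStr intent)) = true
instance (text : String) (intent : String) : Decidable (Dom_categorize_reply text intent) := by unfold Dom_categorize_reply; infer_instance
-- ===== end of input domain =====

-- B replaces A's short-circuiting if-chain by two stages: collect the SET of all matching
-- categories, then select the winner from a priority list (objective: alternative).

-- ===== PORT A =====
def categorize_reply (text : String) (intent : String) : String :=
  if ["price", "cost", "pricing", "how much", "$", "fee", "payment"].any
      (fun w => PySem.Str.isIn w text) then "pricing"
  else if ["demo", "trial", "test", "try", "see it", "show me"].any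
      (fun w => PySem.Str.isIn w text) then "demo_request"
  else if ["feature", "can it", "does it", "support", "integrate", "work with"].any
      (fun w => PySem.Str.isIn w text) then "features"
  else if intent == "support" then "support"
  else if intent == "not_interested" then "opt_out"
  else if ["call", "meeting", "schedule", "talk", "discuss", "speak"].any
      (fun w => PySem.Str.isIn w text) then "meeting_request"
  else "general"

-- ===== PORT B =====
def pvKeywords : List (String × List String) :=
  [ ("pricing", ["price", "cost", "pricing", "how much", "$", "fee", "payment"]),
    ("demo_request", ["demo", "trial", "test", "try", "see it", "show me"]),
    ("features", ["feature", "can it", "does it", "support", "integrate", "work with"]),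
    ("meeting_request", ["call", "meeting", "schedule", "talk", "discuss", "speak"]) ]

def pvIntentCategory : PySem.Dict String String :=
  PySem.Dict.ofList [("support", "support"), ("not_interested", "opt_out")]

def pvPriority : List String :=
  ["pricing", "demo_request", "features", "support", "opt_out", "meeting_request"]

def categorize_reply_alt (text : String) (intent : String) : String :=
  -- matched = {cat for cat, ws in KEYWORDS.items() if any(w in text for w in ws)}
  let matched : PySem.Set String :=
    PySem.Set.ofList ((pvKeywords.filter
      (fun p => p.2.any (fun w => PySem.Str.isIn w text))).map Prod.fst)
  -- if intent in INTENT_CATEGORY: matched.add(INTENT_CATEGORY[intent])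
  let matched : PySem.Set String :=
    match PySem.Dict.get? pvIntentCategory intent with
    | some c => PySem.Set.add matched c
    | none => matched
  -- next((cat for cat in PRIORITY if cat in matched), 'general')
  (pvPriority.find? (fun c => PySem.Set.contains matched c)).getD "general"

-- ===== PRECONDITION & SPEC =====
def Spec_categorize_reply (text : String) (intent : String) (out : String) : Prop := out = categorize_reply_alt text intent
instance (text : String) (intent : String) (out : String) : Decidable (Spec_categorize_reply text intent out) := by unfold Spec_categorize_reply; infer_instance

-- ===== CLAIM (what is proved, stated in full; the proofs are below) =====
def Claim_equal_categorize_reply : Prop := ∀ (text : String) (intent : String), Dom_categorize_reply text intent → Spec_categorize_reply text intent (categorize_reply text intent)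

-- ===== LEMMAS AND PROOFS =====
lemma pvIC_none (intent : String) (h5 : intent ≠ "support") (h6 : intent ≠ "not_interested") :
    PySem.Dict.get? pvIntentCategory intent = none := by
  have h : pvIntentCategory = PySem.Dict.mk [("support","support"),("not_interested","opt_out")] := by
    decide
  rw [h, PySem.Dict.get?_mk_cons, PySem.Dict.get?_mk_cons]
  simp [h5.symm, h6.symm]
  rfl

-- ===== VERDICT (by name: the statement is the Claim_ definition above) =====
set_option maxHeartbeats 1000000 in
theorem categorize_reply_spec : Claim_equal_categorize_reply := by
  intro text intent _
  unfold Spec_categorize_reply categorize_reply categorize_reply_alt pvKeywords pvPriority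
  cases h1 : (["price", "cost", "pricing", "how much", "$", "fee", "payment"].any
      (fun w => PySem.Str.isIn w text)) <;>
  cases h2 : (["demo", "trial", "test", "try", "see it", "show me"].any
      (fun w => PySem.Str.isIn w text)) <;>
  cases h3 : (["feature", "can it", "does it", "support", "integrate", "work with"].any
      (fun w => PySem.Str.isIn w text)) <;>
  cases h4 : (["call", "meeting", "schedule", "talk", "discuss", "speak"].any
      (fun w => PySem.Str.isIn w text)) <;>
  all_goals (
    by_cases h5 : intent = "support"
    · subst h5; simp only [h1, h2, h3, h4, List.filter]; decide
    · by_cases h6 : intent = "not_interested"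
      · subst h6; simp only [h1, h2, h3, h4, List.filter]; decide
      · simp only [h1, h2, h3, h4, List.filter, pvIC_none intent h5 h6, beq_iff_eq,
          h5, h6, if_true, if_false]
        decide)
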